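-- pv_equiv track=rewrite | github.com/Frank100kgbenchpress/HEX-AI | solution.py | _threatened_bridge_count
-- ===== SOURCE A (Python) =====
-- from typing import Dict, List, Optional, Set, Tuple
--
-- Move = Tuple[int, int]
--
-- def _neighbors_even_r(r: int, c: int, n: int):
-- 	if r % 2 == 0:
-- 		deltas = [(-1, -1), (-1, 0), (0, -1), (0, 1), (1, -1), (1, 0)]
-- 	else:
-- 		deltas = [(-1, 0), (-1, 1), (0, -1), (0, 1), (1, 0), (1, 1)]
-- 	for dr, dc in deltas:
-- 		nr, nc = r + dr, c + dc
-- 		if 0 <= nr < n and 0 <= nc < n: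
-- 			yield nr, nc
--
-- def _threatened_bridge_count(
-- 	matrix: List[List[int]],
-- 	move: Move,
-- 	player_id: int,
-- 	enemy_id: int,
-- ) -> int:
-- 	r, c = move
-- 	n = len(matrix)
-- 	neighbors_move = list(_neighbors_even_r(r, c, n))
-- 	neighbors_move_set = set(neighbors_move)
--
-- 	count = 0
-- 	for er, ec in neighbors_move:
-- 		if matrix[er][ec] != enemy_id:
-- 			continue
-- 		common = neighbors_move_set.intersection(set(_neighbors_even_r(er, ec, n)))
-- 		own_endpoints = 0
-- 		for pr, pc in common:
-- 			if matrix[pr][pc] == player_id: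
-- 				own_endpoints += 1
-- 		if own_endpoints >= 2:
-- 			count += 1
-- 	return count
-- ===== SOURCE B (Python) =====
-- # Per-direction bridge-carrier offset tables: for each neighbor delta (dr,dc)
-- # of the move, the two cells adjacent to both the move and that neighbor,
-- # as offsets from the move, split by row parity of the move.
-- _CARRIERS_EVEN = [
--     ((-1, -1), (-1, 0), (0, -1)),
--     ((-1, 0), (-1, -1), (0, 1)),
--     ((0, -1), (-1, -1), (1, -1)),
--     ((0, 1), (-1, 0), (1, 0)),
--     ((1, -1), (0, -1), (1, 0)),
--     ((1, 0), (0, 1), (1, -1)),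
-- ]
-- _CARRIERS_ODD = [
--     ((-1, 0), (-1, 1), (0, -1)),
--     ((-1, 1), (-1, 0), (0, 1)),
--     ((0, -1), (-1, 0), (1, 0)),
--     ((0, 1), (-1, 1), (1, 1)),
--     ((1, 0), (0, -1), (1, 1)),
--     ((1, 1), (0, 1), (1, 0)),
-- ]
--
-- def _threatened_bridge_count(matrix, move, player_id, enemy_id):
--     r, c = move
--     n = len(matrix)
--     table = _CARRIERS_EVEN if r % 2 == 0 else _CARRIERS_ODD
--     count = 0
--     for (dr, dc), (a1, b1), (a2, b2) in table:
--         er, ec = r + dr, c + dc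
--         if not (0 <= er < n and 0 <= ec < n) or matrix[er][ec] != enemy_id:
--             continue
--         x1, y1 = r + a1, c + b1
--         x2, y2 = r + a2, c + b2
--         if (0 <= x1 < n and 0 <= y1 < n and matrix[x1][y1] == player_id
--                 and 0 <= x2 < n and 0 <= y2 < n and matrix[x2][y2] == player_id):
--             count += 1
--     return count
-- ===== Notes on version B (the rewrite author's own statement) =====
-- stated objective: alternative
-- what changed: Replaces A's per-enemy-neighbor intersection of two generated-and-deduplicated neighbor sets by a precomputed per-direction (per row-parity) bridge-carrier offset table: for each of the 6 directions the two shared carrier cells are read off directly, bounds-checked, and the threat is counted iff both hold player_id.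
import Mathlib
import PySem

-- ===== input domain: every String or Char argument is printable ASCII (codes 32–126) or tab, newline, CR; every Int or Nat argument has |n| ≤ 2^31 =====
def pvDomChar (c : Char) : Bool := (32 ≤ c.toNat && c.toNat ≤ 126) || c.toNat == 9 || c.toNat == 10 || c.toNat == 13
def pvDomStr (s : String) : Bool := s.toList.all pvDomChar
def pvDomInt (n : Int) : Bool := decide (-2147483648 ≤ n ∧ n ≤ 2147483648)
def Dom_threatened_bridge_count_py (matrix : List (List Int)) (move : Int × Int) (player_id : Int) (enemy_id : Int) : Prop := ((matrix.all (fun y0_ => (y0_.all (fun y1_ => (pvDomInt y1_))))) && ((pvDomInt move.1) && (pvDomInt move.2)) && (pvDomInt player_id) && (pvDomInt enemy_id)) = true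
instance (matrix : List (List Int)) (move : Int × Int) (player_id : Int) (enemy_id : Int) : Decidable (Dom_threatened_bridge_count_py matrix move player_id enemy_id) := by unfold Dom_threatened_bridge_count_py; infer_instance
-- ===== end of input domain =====

-- B replaces A's per-neighbor neighbor-set intersection by a precomputed per-direction
-- bridge-carrier offset table (objective: alternative decomposition, same asymptotic cost).

-- ===== PORT A =====
-- the parity-selected delta table of _neighbors_even_r
def pvDeltasA (r : Int) : List (Int × Int) :=
  if PySem.Int.mod r 2 = 0 then [(-1, -1), (-1, 0), (0, -1), (0, 1), (1, -1), (1, 0)]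
  else [(-1, 0), (-1, 1), (0, -1), (0, 1), (1, 0), (1, 1)]

-- the generator loop of _neighbors_even_r over a delta table
def pvNeighOf (ds : List (Int × Int)) (r c n : Int) : List (Int × Int) :=
  ds.foldl (fun acc d =>
    if 0 ≤ r + d.1 ∧ r + d.1 < n ∧ 0 ≤ c + d.2 ∧ c + d.2 < n
    then acc ++ [(r + d.1, c + d.2)] else acc) []

def pvNeighborsEvenR (r c n : Int) : List (Int × Int) := pvNeighOf (pvDeltasA r) r c n

-- matrix[p0][p1]; exact on indices guaranteed in range by Pre_
def pvCell (matrix : List (List Int)) (p : Int × Int) : Int :=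
  PySem.List.pyGetD (PySem.List.pyGetD matrix p.1 []) p.2 0

def threatened_bridge_count_py (matrix : List (List Int)) (move : Int × Int) (player_id : Int) (enemy_id : Int) : Int :=
  let r := move.1
  let c := move.2
  let n : Int := matrix.length
  let neighbors_move := pvNeighborsEvenR r c n
  let neighbors_move_set : PySem.Set (Int × Int) := PySem.Set.ofList neighbors_move
  neighbors_move.foldl (fun count e =>
    if pvCell matrix e ≠ enemy_id then count
    else
      let common := PySem.Set.inter neighbors_move_set (PySem.Set.ofList (pvNeighborsEvenR e.1 e.2 n))
      let own := common.foldl (fun own p => if pvCell matrix p = player_id then own + 1 else own) (0 : Int)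
      if 2 ≤ own then count + 1 else count) 0

-- ===== PORT B =====
-- per-direction carrier tables: (neighbor delta, carrier offset 1, carrier offset 2)
def pvCarriersEven : List ((Int × Int) × (Int × Int) × (Int × Int)) :=
  [((-1, -1), (-1, 0), (0, -1)),
   ((-1, 0), (-1, -1), (0, 1)),
   ((0, -1), (-1, -1), (1, -1)),
   ((0, 1), (-1, 0), (1, 0)),
   ((1, -1), (0, -1), (1, 0)),
   ((1, 0), (0, 1), (1, -1))]

def pvCarriersOdd : List ((Int × Int) × (Int × Int) × (Int × Int)) :=
  [((-1, 0), (-1, 1), (0, -1)),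
   ((-1, 1), (-1, 0), (0, 1)),
   ((0, -1), (-1, 0), (1, 0)),
   ((0, 1), (-1, 1), (1, 1)),
   ((1, 0), (0, -1), (1, 1)),
   ((1, 1), (0, 1), (1, 0))]

def threatened_bridge_count_py_alt (matrix : List (List Int)) (move : Int × Int) (player_id : Int) (enemy_id : Int) : Int :=
  let r := move.1
  let c := move.2
  let n : Int := matrix.length
  let table := if PySem.Int.mod r 2 = 0 then pvCarriersEven else pvCarriersOdd
  table.foldl (fun count t =>
    if ¬(0 ≤ r + t.1.1 ∧ r + t.1.1 < n ∧ 0 ≤ c + t.1.2 ∧ c + t.1.2 < n) ∨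
        pvCell matrix (r + t.1.1, c + t.1.2) ≠ enemy_id then count
    else
      if 0 ≤ r + t.2.1.1 ∧ r + t.2.1.1 < n ∧ 0 ≤ c + t.2.1.2 ∧ c + t.2.1.2 < n ∧
         pvCell matrix (r + t.2.1.1, c + t.2.1.2) = player_id ∧
         0 ≤ r + t.2.2.1 ∧ r + t.2.2.1 < n ∧ 0 ≤ c + t.2.2.2 ∧ c + t.2.2.2 < n ∧
         pvCell matrix (r + t.2.2.1, c + t.2.2.2) = player_id
      then count + 1 else count) 0

-- ===== PRECONDITION & SPEC =====
-- Pre_ excludes exactly the inputs on which the Python A raises IndexError: a ragged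
-- matrix whose row at some in-bounds neighbour of the move is too short for that
-- neighbour's column index (A reads matrix[er][ec] for every in-bounds neighbour).
def Pre_threatened_bridge_count_py (matrix : List (List Int)) (move : Int × Int) (player_id : Int) (enemy_id : Int) : Prop :=
  ∀ d ∈ pvDeltasA move.1,
    0 ≤ move.1 + d.1 → move.1 + d.1 < (matrix.length : Int) →
    0 ≤ move.2 + d.2 → move.2 + d.2 < (matrix.length : Int) →
    move.2 + d.2 < ((PySem.List.pyGetD matrix (move.1 + d.1) []).length : Int)
instance (matrix : List (List Int)) (move : Int × Int) (player_id : Int) (enemy_id : Int) : Decidable (Pre_threatened_bridge_count_py matrix move player_id enemy_id) := by unfold Pre_threatened_bridge_count_py; infer_instance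

def pvWitness_threatened_bridge_count_py : List (List Int) × (Int × Int) × Int × Int :=
  ([[0, 1], [2, 0]], (0, 0), 2, 1)

def Spec_threatened_bridge_count_py (matrix : List (List Int)) (move : Int × Int) (player_id : Int) (enemy_id : Int) (out : Int) : Prop := out = threatened_bridge_count_py_alt matrix move player_id enemy_id
instance (matrix : List (List Int)) (move : Int × Int) (player_id : Int) (enemy_id : Int) (out : Int) : Decidable (Spec_threatened_bridge_count_py matrix move player_id enemy_id out) := by unfold Spec_threatened_bridge_count_py; infer_instance

-- ===== CLAIM (what is proved, stated in full; the proofs are below) =====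
def Claim_equal_threatened_bridge_count_py : Prop := ∀ (matrix : List (List Int)) (move : Int × Int) (player_id : Int) (enemy_id : Int), Dom_threatened_bridge_count_py matrix move player_id enemy_id → Pre_threatened_bridge_count_py matrix move player_id enemy_id → Spec_threatened_bridge_count_py matrix move player_id enemy_id (threatened_bridge_count_py matrix move player_id enemy_id)

-- ===== LEMMAS AND PROOFS =====

theorem pvMod2_eq (r : Int) : PySem.Int.mod r 2 = r % 2 :=
  PySem.Int.mod_eq_emod_of_pos (by decide)

-- shape of the neighbour generator: filter the deltas, then shift
theorem pvNeighOf_shape (ds : List (Int × Int)) (r c n : Int) (acc : List (Int × Int)) :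
    ds.foldl (fun acc d =>
      if 0 ≤ r + d.1 ∧ r + d.1 < n ∧ 0 ≤ c + d.2 ∧ c + d.2 < n
      then acc ++ [(r + d.1, c + d.2)] else acc) acc
    = acc ++ (ds.filter (fun d =>
        decide (0 ≤ r + d.1 ∧ r + d.1 < n ∧ 0 ≤ c + d.2 ∧ c + d.2 < n))).map
        (fun d => (r + d.1, c + d.2)) := by
  induction ds generalizing acc with
  | nil => simp
  | cons d ds ih =>
    by_cases h : 0 ≤ r + d.1 ∧ r + d.1 < n ∧ 0 ≤ c + d.2 ∧ c + d.2 < n <;>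
      simp [List.foldl_cons, h, ih]

theorem pvMem_neighOf (ds : List (Int × Int)) (r c n : Int) (x : Int × Int) :
    x ∈ pvNeighOf ds r c n ↔
      ∃ d ∈ ds, (0 ≤ r + d.1 ∧ r + d.1 < n ∧ 0 ≤ c + d.2 ∧ c + d.2 < n) ∧
        x = (r + d.1, c + d.2) := by
  unfold pvNeighOf
  rw [pvNeighOf_shape]
  simp only [List.nil_append, List.mem_map, List.mem_filter, decide_eq_true_eq]
  constructor
  · rintro ⟨d, ⟨hd, hb⟩, hx⟩; exact ⟨d, hd, hb, hx.symm⟩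
  · rintro ⟨d, hd, hb, hx⟩; exact ⟨d, ⟨hd, hb⟩, hx.symm⟩

theorem pvFoldl_filter_map {α β : Type} (l : List α) (p : α → Prop) [DecidablePred p]
    (f : α → β) (g : Int → β → Int) (a : Int) :
    ((l.filter (fun d => decide (p d))).map f).foldl g a
    = l.foldl (fun acc d => if p d then g acc (f d) else acc) a := by
  induction l generalizing a with
  | nil => rfl
  | cons d ds ih =>
    by_cases h : p d <;> simp [h, List.foldl_cons, ih]

-- fold over the generated neighbour list = fold over the deltas with a bounds guard
theorem pvFoldl_neighOf (ds : List (Int × Int)) (r c n : Int)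
    (g : Int → (Int × Int) → Int) (a : Int) :
    (pvNeighOf ds r c n).foldl g a
    = ds.foldl (fun acc d =>
        if 0 ≤ r + d.1 ∧ r + d.1 < n ∧ 0 ≤ c + d.2 ∧ c + d.2 < n
        then g acc (r + d.1, c + d.2) else acc) a := by
  unfold pvNeighOf
  rw [pvNeighOf_shape, List.nil_append, pvFoldl_filter_map]

-- the intersection A counts over is exactly the two clipped bridge carriers
theorem pvInter_countP (D1 D2 : List (Int × Int)) (r c n : Int) (f : Int × Int → Bool)
    (dd C1 C2 : Int × Int)
    (hC1 : C1 ∈ D1) (hC2 : C2 ∈ D1) (hne : C1 ≠ C2)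
    (hb1 : (C1.1 - dd.1, C1.2 - dd.2) ∈ D2) (hb2 : (C2.1 - dd.1, C2.2 - dd.2) ∈ D2)
    (hfwd : ∀ d1 ∈ D1, ∀ d2 ∈ D2, d1.1 = dd.1 + d2.1 → d1.2 = dd.2 + d2.2 → d1 = C1 ∨ d1 = C2) :
    ((PySem.Set.inter (PySem.Set.ofList (pvNeighOf D1 r c n))
        (PySem.Set.ofList (pvNeighOf D2 (r + dd.1) (c + dd.2) n))).countP f : Int)
    = (if 0 ≤ r + C1.1 ∧ r + C1.1 < n ∧ 0 ≤ c + C1.2 ∧ c + C1.2 < n ∧ f (r + C1.1, c + C1.2) then 1 else 0)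
    + (if 0 ≤ r + C2.1 ∧ r + C2.1 < n ∧ 0 ≤ c + C2.2 ∧ c + C2.2 < n ∧ f (r + C2.1, c + C2.2) then 1 else 0) := by
  have hPne : (r + C1.1, c + C1.2) ≠ (r + C2.1, c + C2.2) := by
    intro h
    apply hne
    rw [Prod.mk.injEq] at h
    exact Prod.ext (by omega) (by omega)
  set L : List (Int × Int) :=
    (if 0 ≤ r + C1.1 ∧ r + C1.1 < n ∧ 0 ≤ c + C1.2 ∧ c + C1.2 < n then [(r + C1.1, c + C1.2)] else [])
    ++ (if 0 ≤ r + C2.1 ∧ r + C2.1 < n ∧ 0 ≤ c + C2.2 ∧ c + C2.2 < n then [(r + C2.1, c + C2.2)] else []) with hL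
  have hLnodup : L.Nodup := by
    rw [hL]
    split_ifs <;> simp [hPne]
  have hmemL : ∀ x, x ∈ L ↔
      ((0 ≤ r + C1.1 ∧ r + C1.1 < n ∧ 0 ≤ c + C1.2 ∧ c + C1.2 < n) ∧ x = (r + C1.1, c + C1.2)) ∨
      ((0 ≤ r + C2.1 ∧ r + C2.1 < n ∧ 0 ≤ c + C2.2 ∧ c + C2.2 < n) ∧ x = (r + C2.1, c + C2.2)) := by
    intro x
    rw [hL]
    split_ifs with h1 h2 h2 <;> simp_all
  have hperm : (PySem.Set.inter (PySem.Set.ofList (pvNeighOf D1 r c n))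
      (PySem.Set.ofList (pvNeighOf D2 (r + dd.1) (c + dd.2) n))).Perm L := by
    rw [List.perm_ext_iff_of_nodup
      (PySem.Set.nodup_inter _ _ (PySem.Set.nodup_ofList _)) hLnodup]
    intro x
    rw [PySem.Set.mem_inter, PySem.Set.mem_ofList, PySem.Set.mem_ofList,
      pvMem_neighOf, pvMem_neighOf, hmemL]
    constructor
    · rintro ⟨⟨d1, hd1, hbd1, hx1⟩, ⟨d2, hd2, hbd2, hx2⟩⟩
      have hx12 : (r + d1.1, c + d1.2) = (r + dd.1 + d2.1, c + dd.2 + d2.2) := by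
        rw [← hx1, ← hx2]
      rw [Prod.mk.injEq] at hx12
      rcases hfwd d1 hd1 d2 hd2 (by omega) (by omega) with h | h
      · left; exact ⟨by rw [← h]; exact hbd1, by rw [hx1, h]⟩
      · right; exact ⟨by rw [← h]; exact hbd1, by rw [hx1, h]⟩
    · rintro (⟨hb, hx⟩ | ⟨hb, hx⟩)
      · obtain ⟨h1, h2, h3, h4⟩ := hb
        refine ⟨⟨C1, hC1, ⟨h1, h2, h3, h4⟩, hx⟩,
          ⟨(C1.1 - dd.1, C1.2 - dd.2), hb1, ⟨by omega, by omega, by omega, by omega⟩, ?_⟩⟩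
        rw [hx, Prod.mk.injEq]; omega
      · obtain ⟨h1, h2, h3, h4⟩ := hb
        refine ⟨⟨C2, hC2, ⟨h1, h2, h3, h4⟩, hx⟩,
          ⟨(C2.1 - dd.1, C2.2 - dd.2), hb2, ⟨by omega, by omega, by omega, by omega⟩, ?_⟩⟩
        rw [hx, Prod.mk.injEq]; omega
  rw [List.Perm.countP_eq f hperm, hL]
  by_cases h1 : 0 ≤ r + C1.1 ∧ r + C1.1 < n ∧ 0 ≤ c + C1.2 ∧ c + C1.2 < n <;>
    by_cases h2 : 0 ≤ r + C2.1 ∧ r + C2.1 < n ∧ 0 ≤ c + C2.2 ∧ c + C2.2 < n <;>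
    by_cases hf1 : f (r + C1.1, c + C1.2) <;>
    by_cases hf2 : f (r + C2.1, c + C2.2) <;>
    simp [h1, h2, hf1, hf2]

-- folds agree when the step functions agree pairwise along the two (equal-length) lists
theorem pvFoldl_eq_of_forall₂ {α β : Type} (l1 : List α) (l2 : List β)
    (g1 : Int → α → Int) (g2 : Int → β → Int)
    (h : List.Forall₂ (fun x y => ∀ acc, g1 acc x = g2 acc y) l1 l2) :
    ∀ a, l1.foldl g1 a = l2.foldl g2 a := by
  induction h with
  | nil => intro a; rfl
  | cons hxy _ ih => intro a; simp only [List.foldl_cons, hxy a]; exact ih _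

-- one direction's contribution: A's intersection test equals B's carrier test
theorem pvStep_eq (matrix : List (List Int)) (player_id enemy_id r c n : Int)
    (D1 D2 : List (Int × Int)) (dd C1 C2 : Int × Int)
    (hD2 : pvDeltasA (r + dd.1) = D2)
    (hC1 : C1 ∈ D1) (hC2 : C2 ∈ D1) (hne : C1 ≠ C2)
    (hb1 : (C1.1 - dd.1, C1.2 - dd.2) ∈ D2) (hb2 : (C2.1 - dd.1, C2.2 - dd.2) ∈ D2)
    (hfwd : ∀ d1 ∈ D1, ∀ d2 ∈ D2, d1.1 = dd.1 + d2.1 → d1.2 = dd.2 + d2.2 → d1 = C1 ∨ d1 = C2)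
    (acc : Int) :
    (if 0 ≤ r + dd.1 ∧ r + dd.1 < n ∧ 0 ≤ c + dd.2 ∧ c + dd.2 < n then
       (if pvCell matrix (r + dd.1, c + dd.2) ≠ enemy_id then acc
        else
          if 2 ≤ ((PySem.Set.inter (PySem.Set.ofList (pvNeighOf D1 r c n))
                (PySem.Set.ofList (pvNeighborsEvenR (r + dd.1) (c + dd.2) n))).foldl
                (fun own p => if pvCell matrix p = player_id then own + 1 else own) (0 : Int))
          then acc + 1 else acc)
     else acc)
    = (if ¬(0 ≤ r + dd.1 ∧ r + dd.1 < n ∧ 0 ≤ c + dd.2 ∧ c + dd.2 < n) ∨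
          pvCell matrix (r + dd.1, c + dd.2) ≠ enemy_id then acc
       else
        if 0 ≤ r + C1.1 ∧ r + C1.1 < n ∧ 0 ≤ c + C1.2 ∧ c + C1.2 < n ∧
           pvCell matrix (r + C1.1, c + C1.2) = player_id ∧
           0 ≤ r + C2.1 ∧ r + C2.1 < n ∧ 0 ≤ c + C2.2 ∧ c + C2.2 < n ∧
           pvCell matrix (r + C2.1, c + C2.2) = player_id
        then acc + 1 else acc) := by
  by_cases hbnd : 0 ≤ r + dd.1 ∧ r + dd.1 < n ∧ 0 ≤ c + dd.2 ∧ c + dd.2 < n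
  · by_cases hcell : pvCell matrix (r + dd.1, c + dd.2) = enemy_id
    · have hne' : ¬ (pvCell matrix (r + dd.1, c + dd.2) ≠ enemy_id) := not_not_intro hcell
      have hor : ¬ (¬(0 ≤ r + dd.1 ∧ r + dd.1 < n ∧ 0 ≤ c + dd.2 ∧ c + dd.2 < n) ∨
          pvCell matrix (r + dd.1, c + dd.2) ≠ enemy_id) := by
        push Not
        exact ⟨hbnd, hcell⟩
      conv_lhs => rw [if_pos hbnd, if_neg hne']
      conv_rhs => rw [if_neg hor]
      unfold pvNeighborsEvenR
      rw [hD2, PySem.List.foldl_ite_add_one,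
        pvInter_countP D1 D2 r c n _ dd C1 C2 hC1 hC2 hne hb1 hb2 hfwd]
      simp only [decide_eq_true_eq, zero_add]
      split_ifs <;> first | rfl | omega
    · rw [if_pos hbnd, if_pos hcell, if_pos (Or.inr hcell)]
  · rw [if_neg hbnd, if_pos (Or.inl hbnd)]

-- ===== VERDICT (by name: the statement is the Claim_ definition above) =====
theorem threatened_bridge_count_py_spec : Claim_equal_threatened_bridge_count_py := by
  intro matrix move player_id enemy_id _hdom _hpre
  unfold Spec_threatened_bridge_count_py
  obtain ⟨r, c⟩ := move
  have hm2 : PySem.Int.mod r 2 = 0 ∨ PySem.Int.mod r 2 = 1 := by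
    rw [pvMod2_eq]; omega
  unfold threatened_bridge_count_py threatened_bridge_count_py_alt
  simp only
  rcases hm2 with hp | hp
  · have hp' : r % 2 = 0 := by rw [← pvMod2_eq]; exact hp
    have hD1 : pvDeltasA r = [(-1, -1), (-1, 0), (0, -1), (0, 1), (1, -1), (1, 0)] := by
      unfold pvDeltasA; rw [if_pos hp]
    have hDm1 : pvDeltasA (r + -1) = [(-1, 0), (-1, 1), (0, -1), (0, 1), (1, 0), (1, 1)] := by
      unfold pvDeltasA
      rw [if_neg (show ¬(PySem.Int.mod (r + -1) 2 = 0) by rw [pvMod2_eq]; omega)]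
    have hD0 : pvDeltasA (r + 0) = [(-1, -1), (-1, 0), (0, -1), (0, 1), (1, -1), (1, 0)] := by
      unfold pvDeltasA
      rw [if_pos (show PySem.Int.mod (r + 0) 2 = 0 by rw [pvMod2_eq]; omega)]
    have hDp1 : pvDeltasA (r + 1) = [(-1, 0), (-1, 1), (0, -1), (0, 1), (1, 0), (1, 1)] := by
      unfold pvDeltasA
      rw [if_neg (show ¬(PySem.Int.mod (r + 1) 2 = 0) by rw [pvMod2_eq]; omega)]
    rw [show pvNeighborsEvenR r c (matrix.length : Int)
        = pvNeighOf [(-1, -1), (-1, 0), (0, -1), (0, 1), (1, -1), (1, 0)] r c (matrix.length : Int) by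
      rw [pvNeighborsEvenR, hD1]]
    rw [if_pos hp, pvFoldl_neighOf]
    refine pvFoldl_eq_of_forall₂ _ _ _ _ ?_ 0
    refine .cons (fun acc => ?_) (.cons (fun acc => ?_) (.cons (fun acc => ?_)
      (.cons (fun acc => ?_) (.cons (fun acc => ?_) (.cons (fun acc => ?_) .nil)))))
    · exact pvStep_eq matrix player_id enemy_id r c _ _ _ (-1, -1) (-1, 0) (0, -1)
        hDm1 (by decide) (by decide) (by decide) (by decide) (by decide) (by decide) acc
    · exact pvStep_eq matrix player_id enemy_id r c _ _ _ (-1, 0) (-1, -1) (0, 1)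
        hDm1 (by decide) (by decide) (by decide) (by decide) (by decide) (by decide) acc
    · exact pvStep_eq matrix player_id enemy_id r c _ _ _ (0, -1) (-1, -1) (1, -1)
        hD0 (by decide) (by decide) (by decide) (by decide) (by decide) (by decide) acc
    · exact pvStep_eq matrix player_id enemy_id r c _ _ _ (0, 1) (-1, 0) (1, 0)
        hD0 (by decide) (by decide) (by decide) (by decide) (by decide) (by decide) acc
    · exact pvStep_eq matrix player_id enemy_id r c _ _ _ (1, -1) (0, -1) (1, 0)
        hDp1 (by decide) (by decide) (by decide) (by decide) (by decide) (by decide) acc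
    · exact pvStep_eq matrix player_id enemy_id r c _ _ _ (1, 0) (0, 1) (1, -1)
        hDp1 (by decide) (by decide) (by decide) (by decide) (by decide) (by decide) acc
  · have hp' : r % 2 = 1 := by rw [← pvMod2_eq]; exact hp
    have hD1 : pvDeltasA r = [(-1, 0), (-1, 1), (0, -1), (0, 1), (1, 0), (1, 1)] := by
      unfold pvDeltasA
      rw [if_neg (show ¬(PySem.Int.mod r 2 = 0) by rw [pvMod2_eq]; omega)]
    have hDm1 : pvDeltasA (r + -1) = [(-1, -1), (-1, 0), (0, -1), (0, 1), (1, -1), (1, 0)] := by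
      unfold pvDeltasA
      rw [if_pos (show PySem.Int.mod (r + -1) 2 = 0 by rw [pvMod2_eq]; omega)]
    have hD0 : pvDeltasA (r + 0) = [(-1, 0), (-1, 1), (0, -1), (0, 1), (1, 0), (1, 1)] := by
      unfold pvDeltasA
      rw [if_neg (show ¬(PySem.Int.mod (r + 0) 2 = 0) by rw [pvMod2_eq]; omega)]
    have hDp1 : pvDeltasA (r + 1) = [(-1, -1), (-1, 0), (0, -1), (0, 1), (1, -1), (1, 0)] := by
      unfold pvDeltasA
      rw [if_pos (show PySem.Int.mod (r + 1) 2 = 0 by rw [pvMod2_eq]; omega)]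
    rw [show pvNeighborsEvenR r c (matrix.length : Int)
        = pvNeighOf [(-1, 0), (-1, 1), (0, -1), (0, 1), (1, 0), (1, 1)] r c (matrix.length : Int) by
      rw [pvNeighborsEvenR, hD1]]
    rw [if_neg (show ¬(PySem.Int.mod r 2 = 0) by rw [pvMod2_eq]; omega), pvFoldl_neighOf]
    refine pvFoldl_eq_of_forall₂ _ _ _ _ ?_ 0
    refine .cons (fun acc => ?_) (.cons (fun acc => ?_) (.cons (fun acc => ?_)
      (.cons (fun acc => ?_) (.cons (fun acc => ?_) (.cons (fun acc => ?_) .nil)))))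
    · exact pvStep_eq matrix player_id enemy_id r c _ _ _ (-1, 0) (-1, 1) (0, -1)
        hDm1 (by decide) (by decide) (by decide) (by decide) (by decide) (by decide) acc
    · exact pvStep_eq matrix player_id enemy_id r c _ _ _ (-1, 1) (-1, 0) (0, 1)
        hDm1 (by decide) (by decide) (by decide) (by decide) (by decide) (by decide) acc
    · exact pvStep_eq matrix player_id enemy_id r c _ _ _ (0, -1) (-1, 0) (1, 0)
        hD0 (by decide) (by decide) (by decide) (by decide) (by decide) (by decide) acc
    · exact pvStep_eq matrix player_id enemy_id r c _ _ _ (0, 1) (-1, 1) (1, 1)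
        hD0 (by decide) (by decide) (by decide) (by decide) (by decide) (by decide) acc
    · exact pvStep_eq matrix player_id enemy_id r c _ _ _ (1, 0) (0, -1) (1, 1)
        hDp1 (by decide) (by decide) (by decide) (by decide) (by decide) (by decide) acc
    · exact pvStep_eq matrix player_id enemy_id r c _ _ _ (1, 1) (0, 1) (1, 0)
        hDp1 (by decide) (by decide) (by decide) (by decide) (by decide) (by decide) acc
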